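-- pv_equiv track=rewrite | github.com/truemogician/Physiological-Signal-Analysis | src/dataset/way_eeg_gal.py | get_default_result_dir_name
-- ===== SOURCE A (Python) =====
-- from typing import cast, List, Dict, Tuple, NamedTuple, Literal, Optional, Union
--
-- def get_default_result_dir_name(indices: List[Tuple[int, int]]):
--     series: Dict[int, List[int]] = {}
--     for p, s in indices:
--         if p not in series:
--             series[p] = []
--         series[p].append(s)
--     for ss in series.values():
--         ss.sort()
--     participants = list(series.keys())
--     participants.sort()
--     return "+".join([str(p) if len(series[p]) == 9 else f"{p}({','.join([str(s) for s in series[p]])})" for p in participants])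
-- ===== SOURCE B (Python) =====
-- def _fmt(p, ss):
--     return str(p) if len(ss) == 9 else f"{p}({','.join(str(s) for s in ss)})"
--
-- def get_default_result_dir_name(indices):
--     # One sort (participant, then series), then a single linear grouping pass.
--     parts = []
--     cur_p = None
--     cur_ss = None
--     for p, s in sorted(indices):
--         if cur_ss is not None and p == cur_p:
--             cur_ss.append(s)
--         else:
--             if cur_ss is not None:
--                 parts.append(_fmt(cur_p, cur_ss))
--             cur_p, cur_ss = p, [s]
--     if cur_ss is not None:
--         parts.append(_fmt(cur_p, cur_ss))
--     return "+".join(parts)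
-- ===== Notes on version B (the rewrite author's own statement) =====
-- stated objective: idiomatic
-- what changed: Replaced the dict-bucketing with per-bucket sorts and a key sort by a single lexicographic sort of the pairs followed by one linear grouping pass that emits each participant's group as it closes.
import Mathlib
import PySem

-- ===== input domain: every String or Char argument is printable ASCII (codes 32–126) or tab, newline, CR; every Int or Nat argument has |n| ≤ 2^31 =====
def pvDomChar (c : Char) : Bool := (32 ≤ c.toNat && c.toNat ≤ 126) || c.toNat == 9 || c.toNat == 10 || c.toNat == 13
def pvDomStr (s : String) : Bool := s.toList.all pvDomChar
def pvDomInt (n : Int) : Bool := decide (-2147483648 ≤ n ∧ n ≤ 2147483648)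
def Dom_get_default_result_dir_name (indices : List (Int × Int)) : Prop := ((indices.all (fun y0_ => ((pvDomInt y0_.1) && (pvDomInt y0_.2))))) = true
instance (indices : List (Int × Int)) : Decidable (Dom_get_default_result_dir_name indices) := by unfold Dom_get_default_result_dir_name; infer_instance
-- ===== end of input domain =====

-- B replaces A's dict bucketing + per-bucket sorts by one lexicographic sort and a single
-- linear grouping pass (idiomatic; same asymptotic cost).

-- ===== PORT A =====
-- shared formatting of one participant group: str(p) if len(ss)==9 else f"{p}({','.join(...)})"
def pvFmt (p : Int) (ss : List Int) : String :=
  if ss.length = 9 then PySem.Int.toStr p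
  else PySem.Int.toStr p ++ "(" ++ PySem.Str.join "," (ss.map PySem.Int.toStr) ++ ")"

def get_default_result_dir_name (indices : List (Int × Int)) : String :=
  -- series: Dict[int, List[int]] built by the loop (setdefault-style guard, then append)
  let series : PySem.Dict Int (List Int) :=
    indices.foldl (fun d x =>
      let d := if d.contains x.1 then d else d.insert x.1 ([] : List Int)
      d.modify x.1 [] (fun l => l ++ [x.2])) PySem.Dict.empty
  -- for ss in series.values(): ss.sort()   (in-place: each value replaced by its sorted self)
  let series : PySem.Dict Int (List Int) :=
    PySem.Dict.mk (series.items.map (fun kv => (kv.1, PySem.List.sorted kv.2 (fun y => y) false)))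
  -- participants = sorted(series.keys())
  let participants := PySem.List.sorted series.keys (fun y => y) false
  PySem.Str.join "+" (participants.map (fun p => pvFmt p (series.getD p [])))

-- ===== PORT B =====
-- the grouping pass: current group (p, ss) is carried; on a key change the group is emitted
def pvRun (p : Int) (ss : List Int) : List (Int × Int) → List (Int × List Int)
  | [] => [(p, ss)]
  | (q, s) :: rest => if q = p then pvRun p (ss ++ [s]) rest else (p, ss) :: pvRun q [s] rest

def get_default_result_dir_name_alt (indices : List (Int × Int)) : String :=
  match PySem.List.sorted2 indices (fun x => x.1) (fun x => x.2) false with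
  | [] => PySem.Str.join "+" []
  | (q, s) :: rest => PySem.Str.join "+" ((pvRun q [s] rest).map (fun g => pvFmt g.1 g.2))

-- ===== PRECONDITION & SPEC =====
def Spec_get_default_result_dir_name (indices : List (Int × Int)) (out : String) : Prop := out = get_default_result_dir_name_alt indices
instance (indices : List (Int × Int)) (out : String) : Decidable (Spec_get_default_result_dir_name indices out) := by unfold Spec_get_default_result_dir_name; infer_instance

-- ===== CLAIM (what is proved, stated in full; the proofs are below) =====
def Claim_equal_get_default_result_dir_name : Prop := ∀ (indices : List (Int × Int)), Dom_get_default_result_dir_name indices → Spec_get_default_result_dir_name indices (get_default_result_dir_name indices)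

-- ===== LEMMAS AND PROOFS =====

-- lexicographic order on pairs (Python's default tuple order, non-strict)
def pvR (a b : Int × Int) : Prop := a.1 < b.1 ∨ (a.1 = b.1 ∧ a.2 ≤ b.2)

def pvLtb (a b : Int × Int) : Bool :=
  decide (a.1 < b.1) || (!decide (b.1 < a.1) && decide (a.2 < b.2))

lemma pvR_trans {a b c : Int × Int} (h1 : pvR a b) (h2 : pvR b c) : pvR a c := by
  unfold pvR at *; omega

lemma pvLtb_true {a b : Int × Int} (h : pvLtb a b = true) : pvR a b := by
  unfold pvLtb at h; unfold pvR; simp at h; omega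

lemma pvLtb_false {a b : Int × Int} (h : pvLtb a b = false) : pvR b a := by
  unfold pvLtb at h; unfold pvR; simp at h; omega

lemma pairwise_insertBy (x : Int × Int) (ys : List (Int × Int))
    (hp : ys.Pairwise pvR) : (PySem.List.insertBy pvLtb x ys).Pairwise pvR := by
  induction ys with
  | nil => simp [PySem.List.insertBy]
  | cons y ys ih =>
    rw [show PySem.List.insertBy pvLtb x (y :: ys)
        = if pvLtb x y then x :: y :: ys else y :: PySem.List.insertBy pvLtb x ys from by
          simp [PySem.List.insertBy]]
    rcases List.pairwise_cons.mp hp with ⟨hy, hys⟩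
    by_cases h : pvLtb x y = true
    · simp only [h, if_true]
      refine List.pairwise_cons.mpr ⟨?_, hp⟩
      intro z hz
      rcases List.mem_cons.mp hz with rfl | hz
      · exact pvLtb_true h
      · exact pvR_trans (pvLtb_true h) (hy _ hz)
    · simp only [h, if_false]
      refine List.pairwise_cons.mpr ⟨?_, ih hys⟩
      intro z hz
      rcases (PySem.List.mem_insertBy _ _ _ _).mp hz with rfl | hz
      · exact pvLtb_false (by simpa using h)
      · exact hy _ hz

lemma pairwise_sorted2 (xs : List (Int × Int)) :
    (PySem.List.sorted2 xs (fun x => x.1) (fun x => x.2) false).Pairwise pvR := by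
  rw [show PySem.List.sorted2 xs (fun x => x.1) (fun x => x.2) false
      = xs.foldl (fun acc x => PySem.List.insertBy pvLtb x acc) [] from rfl]
  have : ∀ (l : List (Int × Int)) (acc : List (Int × Int)), acc.Pairwise pvR →
      (l.foldl (fun acc x => PySem.List.insertBy pvLtb x acc) acc).Pairwise pvR := by
    intro l
    induction l with
    | nil => intro acc h; simpa using h
    | cons a l ih => intro acc h; exact ih _ (pairwise_insertBy a acc h)
  exact this xs [] (by simp)

-- dedup (= PySem.Set.ofList) cons facts
lemma pvDiscard_of_not_mem {p : Int} {s : List Int} (h : p ∉ s) :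
    PySem.Set.discard s p = s := by
  unfold PySem.Set.discard
  rw [List.filter_eq_self]
  intro a ha
  simp only [Bool.not_eq_true', beq_eq_false_iff_ne, ne_eq]
  rintro rfl
  exact h ha

lemma pvDedup_cons_not_mem {p : Int} {xs : List Int} (h : p ∉ xs) :
    PySem.List.dedup (p :: xs) = p :: PySem.List.dedup xs := by
  simp only [PySem.List.dedup_eq_ofList, PySem.Set.ofList_cons]
  rw [pvDiscard_of_not_mem]
  rw [PySem.Set.mem_ofList]; exact h

lemma pvDedup_cons_cons (p : Int) (xs : List Int) :
    PySem.List.dedup (p :: p :: xs) = PySem.List.dedup (p :: xs) := by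
  simp only [PySem.List.dedup_eq_ofList, PySem.Set.ofList_cons]
  unfold PySem.Set.discard
  simp [List.filter_filter]

-- the grouping pass characterised on a list whose keys are nondecreasing
lemma pvRun_eq : ∀ (l : List (Int × Int)) (p : Int) (ss : List Int),
    l.Pairwise (fun a b => a.1 ≤ b.1) → (∀ x ∈ l, p ≤ x.1) →
    pvRun p ss l = (PySem.List.dedup (p :: l.map (fun x => x.1))).map
      (fun q => (q, (if q = p then ss else []) ++ ((l.filter (fun x => x.1 == q)).map (fun x => x.2))))
  | [], p, ss, _, _ => by
    show [(p, ss)] = _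
    simp [PySem.List.dedup_eq_ofList, PySem.Set.ofList_cons,
      PySem.Set.discard, PySem.Set.ofList]
  | (q, s) :: rest, p, ss, hp, hall => by
    rcases List.pairwise_cons.mp hp with ⟨hq, hrest⟩
    by_cases hqp : q = p
    · subst hqp
      have hall' : ∀ x ∈ rest, q ≤ x.1 := fun x hx => hq x hx
      rw [show pvRun q ss ((q, s) :: rest) = pvRun q (ss ++ [s]) rest from by simp [pvRun]]
      rw [pvRun_eq rest q (ss ++ [s]) hrest hall']
      rw [show ((q, s) :: rest).map (fun x => x.1) = q :: rest.map (fun x => x.1) from rfl,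
          pvDedup_cons_cons]
      apply List.map_congr_left
      intro q' _
      by_cases hq' : q' = q
      · subst hq'
        simp [List.filter_cons]
      · simp [List.filter_cons, hq', Ne.symm hq']
    · have hpq : p < q := lt_of_le_of_ne (hall (q, s) (List.mem_cons_self ..)) (Ne.symm hqp)
      have hnot : p ∉ ((q, s) :: rest).map (fun x => x.1) := by
        intro hmem
        rcases List.mem_map.mp hmem with ⟨x, hx, hx1⟩
        rcases List.mem_cons.mp hx with rfl | hx
        · exact hqp hx1
        · have := hq x hx; omega
      rw [show pvRun p ss ((q, s) :: rest) = (p, ss) :: pvRun q [s] rest from by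
        simp [pvRun, hqp]]
      rw [pvRun_eq rest q [s] hrest (fun x hx => hq x hx)]
      rw [pvDedup_cons_not_mem hnot]
      rw [List.map_cons]
      congr 1
      · have hfil : ((q, s) :: rest).filter (fun x => x.1 == p) = [] := by
          rw [List.filter_eq_nil_iff]
          intro a ha
          simp only [beq_iff_eq]
          intro h1
          exact hnot (List.mem_map.mpr ⟨a, ha, h1⟩)
        simp [hfil]
      · rw [show ((q, s) :: rest).map (fun x => x.1) = q :: rest.map (fun x => x.1) from rfl]
        apply List.map_congr_left
        intro q' hq'
        have hq'mem : q' ∈ q :: rest.map (fun x => x.1) := by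
          have := PySem.List.mem_dedup (q :: rest.map (fun x => x.1)) q'
          exact this.mp hq'
        have hq'p : q' ≠ p := by
          rcases List.mem_cons.mp hq'mem with rfl | hmem
          · exact hqp
          · rcases List.mem_map.mp hmem with ⟨x, hx, hx1⟩
            have := hq x hx; omega
        by_cases hq'q : q' = q
        · subst hq'q
          simp [hq'p, List.filter_cons]
        · simp [hq'p, hq'q, List.filter_cons, Ne.symm hq'q]

lemma pvOfList_sublist : ∀ (xs : List Int), (PySem.Set.ofList xs).Sublist xs
  | [] => by simp [PySem.Set.ofList]
  | x :: xs => by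
    rw [PySem.Set.ofList_cons]
    unfold PySem.Set.discard
    exact List.Sublist.cons₂ x ((List.filter_sublist).trans (pvOfList_sublist xs))

-- B assembled: one sorted pass, grouped
lemma pvAlt_eq (indices : List (Int × Int)) :
    get_default_result_dir_name_alt indices =
      PySem.Str.join "+"
        ((PySem.List.dedup ((PySem.List.sorted2 indices (fun x => x.1) (fun x => x.2) false).map (fun x => x.1))).map
          (fun p => pvFmt p
            (((PySem.List.sorted2 indices (fun x => x.1) (fun x => x.2) false).filter (fun x => x.1 == p)).map (fun x => x.2))))
  := by
  have hpw := pairwise_sorted2 indices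
  unfold get_default_result_dir_name_alt
  cases hsl : PySem.List.sorted2 indices (fun x => x.1) (fun x => x.2) false with
  | nil =>
    show PySem.Str.join "+" [] = _
    simp [PySem.List.dedup_eq_ofList, PySem.Set.ofList]
  | cons qs rest =>
    obtain ⟨q, s⟩ := qs
    show PySem.Str.join "+" ((pvRun q [s] rest).map (fun g => pvFmt g.1 g.2)) = _
    rw [hsl] at hpw
    rcases List.pairwise_cons.mp hpw with ⟨hq, hrest⟩
    have hall : ∀ x ∈ rest, q ≤ x.1 := by
      intro x hx
      have := hq x hx
      unfold pvR at this; omega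
    have hrest' : rest.Pairwise (fun a b => a.1 ≤ b.1) := by
      apply hrest.imp
      intro a b h
      unfold pvR at h; omega
    rw [pvRun_eq rest q [s] hrest' hall]
    rw [List.map_map]
    congr 1
    rw [show ((q, s) :: rest).map (fun x => x.1) = q :: rest.map (fun x => x.1) from rfl]
    apply List.map_congr_left
    intro q' _
    by_cases hq' : q' = q
    · subst hq'
      simp [Function.comp, pvFmt, List.filter_cons]
    · simp [Function.comp, hq', Ne.symm hq', List.filter_cons]

-- A-side: the build loop is the modify loop
lemma pvStep_eq : (fun (d : PySem.Dict Int (List Int)) (x : Int × Int) =>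
      let d' := if d.contains x.1 then d else d.insert x.1 ([] : List Int)
      d'.modify x.1 [] (fun l => l ++ [x.2]))
    = fun d x => d.modify x.1 [] (fun l => l ++ [x.2]) := by
  funext d x
  by_cases h : d.contains x.1
  · simp [h]
  · simp only [h, if_false, Bool.false_eq_true]
    unfold PySem.Dict.modify
    rw [PySem.Dict.getD_insert_self, PySem.Dict.insert_insert_self,
        PySem.Dict.getD_of_not_contains _ _ (by simpa using h)]

-- the value-sorting pass, seen through getD
lemma pvGetD_mk_mapsort : ∀ (L : List (Int × List Int)) (p : Int),
    (PySem.Dict.mk (L.map (fun kv => (kv.1, PySem.List.sorted kv.2 (fun y => y) false)))).getD p []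
      = PySem.List.sorted ((PySem.Dict.mk L).getD p []) (fun y => y) false
  | [], p => rfl
  | kv :: L, p => by
    by_cases h : kv.1 == p
    · simp [PySem.Dict.getD, PySem.Dict.get?, List.find?_cons, h]
    · simp only [List.map_cons]
      unfold PySem.Dict.getD PySem.Dict.get?
      rw [show List.find? (fun pr => pr.1 == p)
            ((kv.1, PySem.List.sorted kv.2 (fun y => y) false)
              :: L.map (fun kv => (kv.1, PySem.List.sorted kv.2 (fun y => y) false)))
          = List.find? (fun pr => pr.1 == p) (L.map (fun kv => (kv.1, PySem.List.sorted kv.2 (fun y => y) false))) from by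
            rw [List.find?_cons]; simp [h]]
      rw [show List.find? (fun pr => pr.1 == p) (kv :: L)
          = List.find? (fun pr => pr.1 == p) L from by
            rw [List.find?_cons]; simp [h]]
      exact pvGetD_mk_mapsort L p

-- A assembled
lemma pvA_eq (indices : List (Int × Int)) :
    get_default_result_dir_name indices =
      PySem.Str.join "+"
        ((PySem.List.sorted (PySem.Set.ofList (indices.map (fun x => x.1))) (fun y => y) false).map
          (fun p => pvFmt p
            (PySem.List.sorted ((indices.filter (fun x => x.1 == p)).map (fun x => x.2)) (fun y => y) false)))
  := by
  unfold get_default_result_dir_name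
  rw [pvStep_eq]
  set D := indices.foldl
      (fun d x => d.modify x.1 ([] : List Int) (fun l => l ++ [x.2])) PySem.Dict.empty with hD
  have hkeys : D.keys = PySem.Set.ofList (indices.map (fun x => x.1)) := by
    rw [hD, PySem.Dict.keys_foldl_modify_key indices (fun x => x.1) ([] : List Int)
        (fun _ x l => l ++ [x.2]) PySem.Dict.empty]
    rw [PySem.Dict.keys_empty, PySem.Set.update_nil_left]
  have hgetD : ∀ p, D.getD p [] = (indices.filter (fun x => x.1 == p)).map (fun x => x.2) := by
    intro p
    rw [hD, PySem.Dict.getD_foldl_modify_append indices PySem.Dict.empty p,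
        PySem.Dict.getD_empty]
    simp
  have hkeys2 : (PySem.Dict.mk (D.items.map
      (fun kv => (kv.1, PySem.List.sorted kv.2 (fun y => y) false)))).keys = D.keys := by
    simp [PySem.Dict.keys, List.map_map, Function.comp]
  show PySem.Str.join "+"
      ((PySem.List.sorted (PySem.Dict.mk (D.items.map
          (fun kv => (kv.1, PySem.List.sorted kv.2 (fun y => y) false)))).keys ((fun y => y)) false).map
        (fun p => pvFmt p ((PySem.Dict.mk (D.items.map
          (fun kv => (kv.1, PySem.List.sorted kv.2 (fun y => y) false)))).getD p []))) = _
  rw [hkeys2, hkeys]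
  apply congrArg
  apply List.map_congr_left
  intro p _
  rw [pvGetD_mk_mapsort D.items p]
  rw [show PySem.Dict.mk D.items = D from rfl]
  rw [hgetD p]

-- ===== VERDICT (by name: the statement is the Claim_ definition above) =====
theorem get_default_result_dir_name_spec : Claim_equal_get_default_result_dir_name := by
  intro indices _
  unfold Spec_get_default_result_dir_name
  rw [pvA_eq, pvAlt_eq]
  set sl := PySem.List.sorted2 indices (fun x => x.1) (fun x => x.2) false with hsl
  have hperm : sl.Perm indices := PySem.List.sorted2_perm indices _ _ false
  have hpw : sl.Pairwise pvR := pairwise_sorted2 indices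
  have hfstle : (sl.map (fun x => x.1)).Pairwise (fun a b => a ≤ b) := by
    rw [List.pairwise_map]
    apply hpw.imp
    intro a b h; unfold pvR at h; omega
  -- the sorted distinct keys are exactly dedup of the sorted keys
  have hkeys : PySem.List.sorted (PySem.Set.ofList (indices.map (fun x => x.1))) (fun y => y) false
      = PySem.List.dedup (sl.map (fun x => x.1)) := by
    apply PySem.List.sorted_id_eq_of_perm_of_pairwise
    · rw [List.perm_ext_iff_of_nodup]
      · intro a
        rw [PySem.List.dedup_eq_ofList, PySem.Set.mem_ofList, PySem.Set.mem_ofList]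
        exact (hperm.map (fun x => x.1)).mem_iff
      · rw [PySem.List.dedup_eq_ofList]; exact PySem.Set.nodup_ofList _
      · exact PySem.Set.nodup_ofList _
    · rw [PySem.List.dedup_eq_ofList]
      have hsub : (PySem.Set.ofList (sl.map (fun x => x.1))).Sublist (sl.map (fun x => x.1)) :=
        pvOfList_sublist _
      exact hfstle.sublist hsub
  rw [hkeys]
  apply congrArg
  apply List.map_congr_left
  intro p _
  apply congrArg
  apply PySem.List.sorted_id_eq_of_perm_of_pairwise
  · exact (hperm.filter _).map _
  · rw [List.pairwise_map]
    have hfilpw : (sl.filter (fun x => x.1 == p)).Pairwise pvR :=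
      hpw.sublist List.filter_sublist
    apply hfilpw.imp_of_mem
    intro a b ha hb h
    have ha1 : a.1 = p := by simpa using (List.mem_filter.mp ha).2
    have hb1 : b.1 = p := by simpa using (List.mem_filter.mp hb).2
    unfold pvR at h; omega
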